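-- pv_equiv track=rewrite | github.com/AudriusDai/adventofcode | day_1/task_2/grouper/grouper.py | group_data
-- ===== SOURCE A (Python) =====
-- from typing import List
--
-- def group_data(data: List[int], group_size: int) -> List[int]:
--     result = []
--     if not data:
--         return result
--
--     if len(data) < group_size:
--         raise Exception(f'group size cannot be greater than data provided: data: {len(data)}, group_size: {group_size}')
--
--     for i in range(len(data) - (group_size - 1)):
--         s = 0
--         for j in range(group_size):
--             s += data[i + j]
--         result.append(s)
--
--     return result
-- ===== SOURCE B (Python) =====
-- from typing import List
--
-- def group_data(data: List[int], group_size: int) -> List[int]: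
--     if not data:
--         return []
--
--     if len(data) < group_size:
--         raise Exception(f'group size cannot be greater than data provided: data: {len(data)}, group_size: {group_size}')
--
--     prefix = [0]
--     for x in data:
--         prefix.append(prefix[-1] + x)
--
--     return [prefix[i + group_size] - prefix[i]
--             for i in range(len(data) - group_size + 1)]
-- ===== Notes on version B (the rewrite author's own statement) =====
-- stated objective: faster
-- what changed: B replaces A's nested loops (re-summing each window) by a one-pass prefix-sum array, so each window sum is one subtraction.
-- outside the precondition, e.g. on group_data([1, 2], -1): A returns [0, 0, 0, 0], B raises IndexError
import Mathlib
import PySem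

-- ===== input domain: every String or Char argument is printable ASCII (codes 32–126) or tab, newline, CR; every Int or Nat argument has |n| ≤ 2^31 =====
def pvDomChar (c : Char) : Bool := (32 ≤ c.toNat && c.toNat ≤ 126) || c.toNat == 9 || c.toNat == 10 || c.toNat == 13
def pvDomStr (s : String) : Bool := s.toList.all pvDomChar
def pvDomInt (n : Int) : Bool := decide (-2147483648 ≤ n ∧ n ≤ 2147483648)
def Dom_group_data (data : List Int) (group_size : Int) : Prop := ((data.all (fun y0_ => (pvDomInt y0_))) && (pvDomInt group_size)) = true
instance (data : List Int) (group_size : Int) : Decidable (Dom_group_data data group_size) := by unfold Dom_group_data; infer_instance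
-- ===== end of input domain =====

-- B computes the window sums from a prefix-sum array (one subtraction per window)
-- instead of A's inner re-summing loop; the equivalence is about return values on Pre_.

-- ===== PORT A =====
def group_data (data : List Int) (group_size : Int) : List Int :=
  if data = [] then []
  else if (data.length : Int) < group_size then []  -- Python A raises Exception here; excluded by Pre_
  else
    (PySem.List.pyRange 0 ((data.length : Int) - (group_size - 1)) 1).foldl
      (fun result i =>
        result ++ [(PySem.List.pyRange 0 group_size 1).foldl
          (fun s j => s + PySem.List.pyGetD data (i + j) 0) 0])
      []

-- ===== PORT B =====
def group_data_alt (data : List Int) (group_size : Int) : List Int :=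
  if data = [] then []
  else if (data.length : Int) < group_size then []  -- Python B raises Exception here; excluded by Pre_
  else
    let pref := data.foldl (fun p x => p ++ [PySem.List.pyGetD p (-1) 0 + x]) [0]
    (PySem.List.pyRange 0 ((data.length : Int) - group_size + 1) 1).map
      (fun i => PySem.List.pyGetD pref (i + group_size) 0 - PySem.List.pyGetD pref i 0)

-- ===== PRECONDITION & SPEC =====
-- Pre_ excludes (a) len(data) < group_size on nonempty data, where A raises Exception, and
-- (b) negative group_size on nonempty data, where A's all-zeros result is an accident of its
-- empty inner loop and B's prefix-difference indexing raises IndexError.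
def Pre_group_data (data : List Int) (group_size : Int) : Prop :=
  data = [] ∨ (0 ≤ group_size ∧ group_size ≤ (data.length : Int))
instance (data : List Int) (group_size : Int) : Decidable (Pre_group_data data group_size) := by
  unfold Pre_group_data; infer_instance
def pvWitness_group_data : List Int × Int := ([3, 1, 4, 1, 5], 3)

def Spec_group_data (data : List Int) (group_size : Int) (out : List Int) : Prop := out = group_data_alt data group_size
instance (data : List Int) (group_size : Int) (out : List Int) : Decidable (Spec_group_data data group_size out) := by unfold Spec_group_data; infer_instance

-- ===== CLAIM (what is proved, stated in full; the proofs are below) =====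
def Claim_equal_group_data : Prop := ∀ (data : List Int) (group_size : Int), Dom_group_data data group_size → Pre_group_data data group_size → Spec_group_data data group_size (group_data data group_size)

-- ===== LEMMAS AND PROOFS =====

-- B's prefix-building foldl is scanl of (+).
theorem pv_fold_pref (l : List Int) : ∀ (p : List Int) (a : Int),
    l.foldl (fun p x => p ++ [PySem.List.pyGetD p (-1) 0 + x]) (p ++ [a])
      = p ++ List.scanl (· + ·) a l := by
  induction l with
  | nil => intro p a; simp
  | cons x xs ih =>
    intro p a
    rw [List.scanl_cons, List.foldl_cons, PySem.List.pyGetD_neg_one_append_singleton,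
        ih (p ++ [a]) (a + x)]
    simp

-- Entry m of scanl (+) a l is a + sum of the first m elements.
theorem pv_scanl_get (l : List Int) : ∀ (a : Int) (m : Nat), m ≤ l.length →
    (List.scanl (· + ·) a l)[m]? = some (a + (l.take m).sum) := by
  induction l with
  | nil =>
    intro a m hm
    simp only [List.length_nil, Nat.le_zero] at hm
    subst hm
    simp
  | cons x xs ih =>
    intro a m hm
    cases m with
    | zero => simp
    | succ m =>
      simp only [List.scanl_cons, List.getElem?_cons_succ, List.take_succ_cons, List.sum_cons]
      rw [ih (a + x) m (by simpa using hm)]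
      ring_nf

-- A's inner loop over List.range k sums the window starting at it.
theorem pv_window_sum (data : List Int) (it : Nat) :
    ∀ (k : Nat), it + k ≤ data.length →
    (List.range k).foldl (fun s j => s + data.getD (it + j) 0) 0
      = ((data.drop it).take k).sum := by
  intro k
  induction k with
  | zero => intro _; simp
  | succ k ih =>
    intro hk
    rw [List.range_succ, List.foldl_append]
    simp only [List.foldl_cons, List.foldl_nil]
    rw [ih (by omega)]
    have hlen : k < (data.drop it).length := by simp; omega
    rw [List.sum_take_succ _ _ hlen, List.getElem_drop]
    have : it + k < data.length := by omega
    rw [List.getD_eq_getElem data 0 this]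

-- ===== VERDICT (by name: the statement is the Claim_ definition above) =====
theorem group_data_spec : Claim_equal_group_data := by
  intro data group_size _ hpre
  unfold Spec_group_data group_data group_data_alt
  rcases hpre with h | ⟨hge, hle⟩
  · simp [h]
  · by_cases hnil : data = []
    · simp [hnil]
    · simp only [if_neg hnil, if_neg (by omega : ¬ ((data.length : Int) < group_size))]
      -- name the pieces
      obtain ⟨k, rfl⟩ : ∃ k : Nat, group_size = (k : Int) := ⟨group_size.toNat, (Int.toNat_of_nonneg hge).symm⟩
      have hk : k ≤ data.length := by exact_mod_cast hle
      -- B's prefix list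
      have hpref : data.foldl (fun p x => p ++ [PySem.List.pyGetD p (-1) 0 + x]) [0]
          = List.scanl (· + ·) 0 data := by
        simpa using pv_fold_pref data [] 0
      rw [PySem.List.foldl_append_singleton_eq_map, List.nil_append]
      have hb : (data.length : Int) - (k : Int) + 1 = (data.length : Int) - ((k : Int) - 1) := by ring
      rw [hpref, hb]
      apply List.map_congr_left
      intro i hi
      rw [PySem.List.mem_pyRange_one] at hi
      obtain ⟨it, rfl⟩ : ∃ it : Nat, i = (it : Int) := ⟨i.toNat, (Int.toNat_of_nonneg hi.1).symm⟩
      have hit : it + k ≤ data.length := by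
        have := hi.2; omega
      -- B side: two prefix lookups
      have hlen : (List.scanl (· + ·) 0 data).length = data.length + 1 := List.length_scanl ..
      have hB1 : PySem.List.pyGetD (List.scanl (· + ·) 0 data) ((it : Int) + (k : Int)) 0
          = (data.take (it + k)).sum := by
        rw [show (it : Int) + (k : Int) = ((it + k : Nat) : Int) by push_cast; ring,
            PySem.List.pyGetD_natCast, List.getD_eq_getElem?_getD,
            pv_scanl_get data 0 (it + k) hit]
        simp
      have hB2 : PySem.List.pyGetD (List.scanl (· + ·) 0 data) (it : Int) 0
          = (data.take it).sum := by
        rw [PySem.List.pyGetD_natCast, List.getD_eq_getElem?_getD,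
            pv_scanl_get data 0 it (by omega)]
        simp
      rw [hB1, hB2]
      -- A side: the inner loop
      have hA : (PySem.List.pyRange 0 (k : Int) 1).foldl
            (fun s j => s + PySem.List.pyGetD data ((it : Int) + j) 0) 0
          = ((data.drop it).take k).sum := by
        rw [PySem.List.pyRange_one]
        simp only [Int.sub_zero, Int.toNat_natCast, List.foldl_map, Int.zero_add]
        have : ∀ (init : Int) (js : List Nat), (∀ j ∈ js, it + j < data.length) →
            js.foldl (fun s (j : Nat) => s + PySem.List.pyGetD data ((it : Int) + (j : Int)) 0) init
              = js.foldl (fun s j => s + data.getD (it + j) 0) init := by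
          intro init js hjs
          induction js generalizing init with
          | nil => rfl
          | cons j js ihj =>
            simp only [List.foldl_cons]
            rw [show (it : Int) + (j : Int) = ((it + j : Nat) : Int) by push_cast; ring,
                PySem.List.pyGetD_natCast]
            exact ihj _ (fun x hx => hjs x (List.mem_cons_of_mem _ hx))
        rw [this 0 _ (by intro j hj; have := List.mem_range.mp hj; omega)]
        exact pv_window_sum data it k hit
      rw [hA]
      -- arithmetic: take (it+k) sum - take it sum = window sum
      have : data.take (it + k) = data.take it ++ (data.drop it).take k := by
        rw [← List.take_append_drop it data]
        simp [List.take_add]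
      rw [this, List.sum_append]
      ring
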